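-- pv_equiv track=rewrite | github.com/grohong/Beajoon_Algorism | 프로그래머즈/[3차]방금그곡/main.py | encode_sound
-- ===== SOURCE A (Python) =====
-- def encode_sound(before_sound):
--     encode = before_sound
--     sound_encodes = ['C#', 'D#', 'F#', 'G#', 'A#']
--     sound_decodes = ['c', 'd', 'f', 'g', 'a']
--
--     for sound_encode, sound_decode in zip(sound_encodes, sound_decodes):
--         if sound_encode in encode:
--             encode = encode.replace(sound_encode, sound_decode)
--
--     return encode
-- ===== SOURCE B (Python) =====
-- def encode_sound(before_sound):
--     codes = {'C': 'c', 'D': 'd', 'F': 'f', 'G': 'g', 'A': 'a'}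
--     out = []
--     i = 0
--     n = len(before_sound)
--     while i < n:
--         ch = before_sound[i]
--         if ch in codes and i + 1 < n and before_sound[i + 1] == '#':
--             out.append(codes[ch])
--             i += 2
--         else:
--             out.append(ch)
--             i += 1
--     return ''.join(out)
-- ===== Notes on version B (the rewrite author's own statement) =====
-- stated objective: alternative
-- what changed: A runs five sequential str.replace passes (one per sharp note, each rescanning the whole string); B makes a single left-to-right index scan with a dict of the five sharp letters, emitting the lowercase code and skipping two chars when such a letter is followed by the sharp sign.
import Mathlib
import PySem

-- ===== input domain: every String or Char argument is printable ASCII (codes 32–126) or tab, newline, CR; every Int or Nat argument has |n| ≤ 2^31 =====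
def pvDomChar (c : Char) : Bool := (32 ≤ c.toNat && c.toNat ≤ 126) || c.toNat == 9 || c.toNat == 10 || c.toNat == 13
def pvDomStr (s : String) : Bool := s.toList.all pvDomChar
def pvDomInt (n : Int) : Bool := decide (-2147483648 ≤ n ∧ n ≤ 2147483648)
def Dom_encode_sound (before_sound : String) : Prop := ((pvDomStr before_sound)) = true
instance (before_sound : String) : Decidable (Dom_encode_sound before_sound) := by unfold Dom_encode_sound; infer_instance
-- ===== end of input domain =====

-- B replaces A's five sequential str.replace passes by one left-to-right scan that
-- encodes each sharp note as it is met (objective: alternative single-pass decomposition).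

-- ===== PORT A =====
def encode_sound (before_sound : String) : String :=
  (List.zip ["C#", "D#", "F#", "G#", "A#"] ["c", "d", "f", "g", "a"]).foldl
    (fun encode p =>
      if PySem.Str.isIn p.1 encode then PySem.Str.replace encode p.1 p.2 else encode)
    before_sound

-- ===== PORT B =====
-- B's dict literal {'C':'c','D':'d','F':'f','G':'g','A':'a'}
def sharpCodes : PySem.Dict Char Char :=
  PySem.Dict.mk [('C', 'c'), ('D', 'd'), ('F', 'f'), ('G', 'g'), ('A', 'a')]

-- B's while loop: look at the current char; if it is a coded letter followed by '#',
-- emit the code and advance by two, else emit the char and advance by one.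
def encodeScan : List Char → List Char
  | [] => []
  | [c] => [c]
  | c :: h :: rest =>
    match sharpCodes.get? c with
    | some lc => if h = '#' then lc :: encodeScan rest else c :: encodeScan (h :: rest)
    | none => c :: encodeScan (h :: rest)

def encode_sound_alt (before_sound : String) : String :=
  String.ofList (encodeScan before_sound.toList)

-- ===== PRECONDITION & SPEC =====
def Spec_encode_sound (before_sound : String) (out : String) : Prop := out = encode_sound_alt before_sound
instance (before_sound : String) (out : String) : Decidable (Spec_encode_sound before_sound out) := by unfold Spec_encode_sound; infer_instance

-- ===== CLAIM (what is proved, stated in full; the proofs are below) =====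
def Claim_equal_encode_sound : Prop := ∀ (before_sound : String), Dom_encode_sound before_sound → Spec_encode_sound before_sound (encode_sound before_sound)

-- ===== LEMMAS AND PROOFS =====

-- One str.replace pass for the two-char pattern [X, '#'] → [x], as a two-step scan.
def rep1 (X x : Char) : List Char → List Char
  | [] => []
  | [c] => [c]
  | c :: h :: rest => if c = X ∧ h = '#' then x :: rep1 X x rest else c :: rep1 X x (h :: rest)

theorem rep1_go_eq (X x : Char) :
    ∀ (fuel : Nat) (l acc : List Char), l.length ≤ fuel →
      PySem.Chars.replace.go [X, '#'] [x] fuel l acc = acc.reverse ++ rep1 X x l := by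
  intro fuel
  induction fuel with
  | zero =>
    intro l acc hl
    have : l = [] := List.eq_nil_of_length_eq_zero (Nat.le_zero.mp hl)
    subst this
    simp [PySem.Chars.replace.go, rep1]
  | succ n ih =>
    intro l acc hl
    match l with
    | [] => simp [PySem.Chars.replace.go, rep1]
    | [c] =>
      have hpre : ([X, '#'] : List Char).isPrefixOf [c] = false := by
        simp [List.isPrefixOf]
      simp only [PySem.Chars.replace.go, hpre, Bool.false_eq_true, if_false]
      rw [ih [] (c :: acc) (by simp)]
      simp [rep1]
    | c :: h :: rest =>
      by_cases hc : c = X ∧ h = '#'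
      · have hpre : ([X, '#'] : List Char).isPrefixOf (c :: h :: rest) = true := by
          simp [List.isPrefixOf, hc.1, hc.2]
        simp only [PySem.Chars.replace.go, hpre, if_true]
        have hdrop : List.drop ([X, '#'] : List Char).length (c :: h :: rest) = rest := rfl
        rw [hdrop, ih rest ([x].reverse ++ acc) (by simp at hl ⊢; omega)]
        simp [rep1, hc.1, hc.2]
      · have hpre : ([X, '#'] : List Char).isPrefixOf (c :: h :: rest) = false := by
          simp only [List.isPrefixOf, Bool.and_true]
          simp only [Bool.and_eq_false_iff, beq_eq_false_iff_ne, ne_eq]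
          by_cases h1 : c = X
          · exact Or.inr (fun h2 => hc ⟨h1, h2.symm⟩)
          · exact Or.inl (fun h2 => h1 h2.symm)
        simp only [PySem.Chars.replace.go, hpre, Bool.false_eq_true, if_false]
        rw [ih (h :: rest) (c :: acc) (by simp at hl ⊢; omega)]
        simp [rep1, hc]

theorem replace_eq_rep1 (X x : Char) (l : List Char) :
    PySem.Chars.replace l [X, '#'] [x] = rep1 X x l := by
  have h : ([X, '#'] : List Char).isEmpty = false := rfl
  simp only [PySem.Chars.replace, h, Bool.false_eq_true, if_false]
  rw [rep1_go_eq X x l.length l [] (le_refl _)]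
  simp

theorem rep1_of_not_infix (X x : Char) (l : List Char) (h : ¬ ([X, '#'] <:+: l)) :
    rep1 X x l = l := by
  induction l using rep1.induct X with
  | case1 => rfl
  | case2 c => rfl
  | case3 c h' rest hc ih =>
    exact absurd ⟨[], rest, by simp [hc.1, hc.2]⟩ h
  | case4 c h' rest hc ih =>
    have hsub : ¬ ([X, '#'] <:+: h' :: rest) :=
      fun hin => h (hin.trans (List.suffix_cons c (h' :: rest)).isInfix)
    simp only [rep1]
    rw [if_neg hc, ih hsub]

theorem stepChars (X x : Char) (l : List Char) :
    (if PySem.Chars.isIn [X, '#'] l then PySem.Chars.replace l [X, '#'] [x] else l) = rep1 X x l := by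
  by_cases h : PySem.Chars.isIn [X, '#'] l = true
  · rw [if_pos h, replace_eq_rep1]
  · rw [if_neg h]
    exact (rep1_of_not_infix X x l
      ((PySem.Chars.isIn_eq_false_iff [X, '#'] l).mp (Bool.eq_false_iff.mpr h))).symm

-- one pass never puts '#' at the front unless it was already there
theorem head_rep1 (X x : Char) (hx : x ≠ '#') (l : List Char) (h : l.head? ≠ some '#') :
    (rep1 X x l).head? ≠ some '#' := by
  match l with
  | [] => simp [rep1]
  | [c] => simpa [rep1] using h
  | c :: h' :: rest =>
    by_cases hc : c = X ∧ h' = '#'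
    · simp only [rep1, if_pos hc, List.head?_cons]
      simpa using hx
    · simp only [rep1, if_neg hc, List.head?_cons]
      simpa using h

-- the composite of A's five passes, innermost applied first
def comp (l : List Char) : List Char :=
  rep1 'A' 'a' (rep1 'G' 'g' (rep1 'F' 'f' (rep1 'D' 'd' (rep1 'C' 'c' l))))

theorem rep1_cons_ne (X x c : Char) (t : List Char) (h : c ≠ X) :
    rep1 X x (c :: t) = c :: rep1 X x t := by
  match t with
  | [] => rfl
  | h' :: r =>
    simp only [rep1]
    rw [if_neg (fun hc => h hc.1)]

theorem rep1_cons_head (X x c : Char) (t : List Char) (h : t.head? ≠ some '#') :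
    rep1 X x (c :: t) = c :: rep1 X x t := by
  match t with
  | [] => rfl
  | h' :: r =>
    have hne : h' ≠ '#' := by simpa using h
    simp only [rep1]
    rw [if_neg (fun hc => hne hc.2)]

theorem rep1_cons_hit (X x : Char) (t : List Char) :
    rep1 X x (X :: '#' :: t) = x :: rep1 X x t := by
  simp [rep1]

theorem comp_cons_head (c : Char) (t : List Char) (h : t.head? ≠ some '#') :
    comp (c :: t) = c :: comp t := by
  unfold comp
  rw [rep1_cons_head 'C' 'c' c t h,
      rep1_cons_head 'D' 'd' c _ (head_rep1 'C' 'c' (by decide) t h),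
      rep1_cons_head 'F' 'f' c _ (head_rep1 'D' 'd' (by decide) _ (head_rep1 'C' 'c' (by decide) t h)),
      rep1_cons_head 'G' 'g' c _ (head_rep1 'F' 'f' (by decide) _ (head_rep1 'D' 'd' (by decide) _ (head_rep1 'C' 'c' (by decide) t h))),
      rep1_cons_head 'A' 'a' c _ (head_rep1 'G' 'g' (by decide) _ (head_rep1 'F' 'f' (by decide) _ (head_rep1 'D' 'd' (by decide) _ (head_rep1 'C' 'c' (by decide) t h))))]

theorem comp_cons_ne (c : Char) (t : List Char)
    (h1 : ¬ c = 'C') (h2 : ¬ c = 'D') (h3 : ¬ c = 'F') (h4 : ¬ c = 'G') (h5 : ¬ c = 'A') :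
    comp (c :: t) = c :: comp t := by
  unfold comp
  rw [rep1_cons_ne 'C' 'c' c t h1, rep1_cons_ne 'D' 'd' c _ h2, rep1_cons_ne 'F' 'f' c _ h3,
      rep1_cons_ne 'G' 'g' c _ h4, rep1_cons_ne 'A' 'a' c _ h5]

theorem sharp_get (c : Char) :
    sharpCodes.get? c =
      if c = 'C' then some 'c' else if c = 'D' then some 'd' else if c = 'F' then some 'f'
      else if c = 'G' then some 'g' else if c = 'A' then some 'a' else none := by
  by_cases h1 : c = 'C'
  · subst h1; decide
  by_cases h2 : c = 'D'
  · subst h2; decide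
  by_cases h3 : c = 'F'
  · subst h3; decide
  by_cases h4 : c = 'G'
  · subst h4; decide
  by_cases h5 : c = 'A'
  · subst h5; decide
  rw [if_neg h1, if_neg h2, if_neg h3, if_neg h4, if_neg h5]
  simp only [sharpCodes, PySem.Dict.get?_mk_cons]
  rw [if_neg (fun hb => h1 (beq_iff_eq.mp hb).symm),
      if_neg (fun hb => h2 (beq_iff_eq.mp hb).symm),
      if_neg (fun hb => h3 (beq_iff_eq.mp hb).symm),
      if_neg (fun hb => h4 (beq_iff_eq.mp hb).symm),
      if_neg (fun hb => h5 (beq_iff_eq.mp hb).symm)]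
  rfl

theorem comp_eq_scan : ∀ l : List Char, comp l = encodeScan l := by
  intro l
  induction l using encodeScan.induct with
  | case1 => rfl
  | case2 c => rfl
  | case3 c rest lc hget ih =>
    have hget0 := hget
    rw [show encodeScan (c :: '#' :: rest) = lc :: encodeScan rest from by
      simp [encodeScan, hget0]]
    unfold comp at ih
    rw [sharp_get] at hget
    split_ifs at hget with h1 h2 h3 h4 h5 <;> try simp at hget
    · subst h1; subst hget
      unfold comp
      rw [rep1_cons_hit 'C' 'c' rest,
          rep1_cons_ne 'D' 'd' 'c' _ (by decide),
          rep1_cons_ne 'F' 'f' 'c' _ (by decide),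
          rep1_cons_ne 'G' 'g' 'c' _ (by decide),
          rep1_cons_ne 'A' 'a' 'c' _ (by decide), ih]
    · subst h2; subst hget
      unfold comp
      rw [rep1_cons_ne 'C' 'c' 'D' _ (by decide), rep1_cons_ne 'C' 'c' '#' _ (by decide),
          rep1_cons_hit 'D' 'd' _,
          rep1_cons_ne 'F' 'f' 'd' _ (by decide),
          rep1_cons_ne 'G' 'g' 'd' _ (by decide),
          rep1_cons_ne 'A' 'a' 'd' _ (by decide), ih]
    · subst h3; subst hget
      unfold comp
      rw [rep1_cons_ne 'C' 'c' 'F' _ (by decide), rep1_cons_ne 'C' 'c' '#' _ (by decide),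
          rep1_cons_ne 'D' 'd' 'F' _ (by decide), rep1_cons_ne 'D' 'd' '#' _ (by decide),
          rep1_cons_hit 'F' 'f' _,
          rep1_cons_ne 'G' 'g' 'f' _ (by decide),
          rep1_cons_ne 'A' 'a' 'f' _ (by decide), ih]
    · subst h4; subst hget
      unfold comp
      rw [rep1_cons_ne 'C' 'c' 'G' _ (by decide), rep1_cons_ne 'C' 'c' '#' _ (by decide),
          rep1_cons_ne 'D' 'd' 'G' _ (by decide), rep1_cons_ne 'D' 'd' '#' _ (by decide),
          rep1_cons_ne 'F' 'f' 'G' _ (by decide), rep1_cons_ne 'F' 'f' '#' _ (by decide),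
          rep1_cons_hit 'G' 'g' _,
          rep1_cons_ne 'A' 'a' 'g' _ (by decide), ih]
    · subst h5; subst hget
      unfold comp
      rw [rep1_cons_ne 'C' 'c' 'A' _ (by decide), rep1_cons_ne 'C' 'c' '#' _ (by decide),
          rep1_cons_ne 'D' 'd' 'A' _ (by decide), rep1_cons_ne 'D' 'd' '#' _ (by decide),
          rep1_cons_ne 'F' 'f' 'A' _ (by decide), rep1_cons_ne 'F' 'f' '#' _ (by decide),
          rep1_cons_ne 'G' 'g' 'A' _ (by decide), rep1_cons_ne 'G' 'g' '#' _ (by decide),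
          rep1_cons_hit 'A' 'a' _, ih]
  | case4 c h rest lc hget hne ih =>
    rw [show encodeScan (c :: h :: rest) = c :: encodeScan (h :: rest) from by
      simp [encodeScan, hget, hne]]
    rw [comp_cons_head c (h :: rest) (by simp [hne]), ih]
  | case5 c h rest hget ih =>
    have hget0 := hget
    rw [sharp_get] at hget
    split_ifs at hget with h1 h2 h3 h4 h5 <;> (try simp at hget)
    rw [show encodeScan (c :: h :: rest) = c :: encodeScan (h :: rest) from by
      simp [encodeScan, hget0]]
    rw [comp_cons_ne c (h :: rest) h1 h2 h3 h4 h5, ih]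

-- ===== VERDICT (by name: the statement is the Claim_ definition above) =====
theorem encode_sound_spec : Claim_equal_encode_sound := by
  intro s _
  unfold Spec_encode_sound
  apply String.toList_inj.mp
  have hA : (encode_sound s).toList = comp s.toList := by
    simp only [encode_sound, List.zip, List.zipWith, List.foldl]
    simp only [apply_ite String.toList, PySem.Str.toList_replace, PySem.Str.isIn_eq]
    rw [show "C#".toList = ['C','#'] from rfl, show "D#".toList = ['D','#'] from rfl,
        show "F#".toList = ['F','#'] from rfl, show "G#".toList = ['G','#'] from rfl,
        show "A#".toList = ['A','#'] from rfl, show "c".toList = ['c'] from rfl,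
        show "d".toList = ['d'] from rfl, show "f".toList = ['f'] from rfl,
        show "g".toList = ['g'] from rfl, show "a".toList = ['a'] from rfl]
    simp only [stepChars]
    unfold comp
    rfl
  rw [hA, comp_eq_scan]
  simp [encode_sound_alt]
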